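-- pv_equiv track=rewrite | github.com/yonsweng/ps | codeforces/1593/d1.py | solve
-- ===== SOURCE A (Python) =====
-- from math import gcd
--
-- def solve(n, a):
--     m = min(a)
--     d = list(map(lambda ai: ai - m, a))
--     d = [di for di in d if di != 0]
--     if len(d) == 0:
--         return -1
--     g = d[0]
--     for di in d[1:]:
--         g = gcd(g, di)
--     return g
-- ===== SOURCE B (Python) =====
-- from math import gcd
--
-- def solve(n, a):
--     b = sorted(a)
--     g = 0
--     for x, y in zip(b, b[1:]):
--         g = gcd(g, y - x)
--     return g if g else -1
-- ===== Notes on version B (the rewrite author's own statement) =====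
-- stated objective: alternative
-- what changed: B sorts the list once and folds gcd over consecutive differences of the sorted list, instead of subtracting the minimum from every element and gcd-folding the filtered nonzero differences.
import Mathlib
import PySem

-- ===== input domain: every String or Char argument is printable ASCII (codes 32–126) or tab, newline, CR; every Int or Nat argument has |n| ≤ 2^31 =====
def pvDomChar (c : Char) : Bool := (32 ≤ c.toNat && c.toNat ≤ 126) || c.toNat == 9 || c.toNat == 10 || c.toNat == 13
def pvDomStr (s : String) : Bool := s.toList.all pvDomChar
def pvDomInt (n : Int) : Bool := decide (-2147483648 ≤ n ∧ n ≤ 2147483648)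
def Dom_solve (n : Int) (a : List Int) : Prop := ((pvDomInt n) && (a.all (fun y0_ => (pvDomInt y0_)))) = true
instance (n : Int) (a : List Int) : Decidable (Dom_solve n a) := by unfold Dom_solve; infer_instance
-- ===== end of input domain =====

-- B replaces A's "subtract the minimum, filter zeros, gcd-fold" by a single gcd-fold over
-- consecutive differences of the sorted list (objective: alternative; same answer proved below).

-- math.gcd on ints: nonnegative gcd (shared by both Pythons)
def g2 (x y : Int) : Int := Int.gcd x y

-- ===== PORT A =====
def solve (n : Int) (a : List Int) : Int :=
  match PySem.List.min? a (fun x => x) with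
  | none => 0   -- unreachable under Pre_solve: Python's min([]) raises ValueError
  | some m =>
    let d := a.map (fun ai => ai - m)
    let d2 := d.filter (fun di => di ≠ 0)
    match d2 with
    | [] => -1
    | g0 :: rest => rest.foldl g2 g0

-- ===== PORT B =====
def solve_alt (n : Int) (a : List Int) : Int :=
  let b := PySem.List.sorted a (fun x => x) false
  let g := (b.zip (PySem.List.slice b (some 1) none)).foldl (fun g p => g2 g (p.2 - p.1)) 0
  if g ≠ 0 then g else -1

-- ===== PRECONDITION & SPEC =====
-- Pre_ excludes only the empty list, on which A's min(a) raises ValueError.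
def Pre_solve (n : Int) (a : List Int) : Prop := a ≠ []
instance (n : Int) (a : List Int) : Decidable (Pre_solve n a) := by unfold Pre_solve; infer_instance
def pvWitness_solve : Int × List Int := (3, [7, 3, 11])

def Spec_solve (n : Int) (a : List Int) (out : Int) : Prop := out = solve_alt n a
instance (n : Int) (a : List Int) (out : Int) : Decidable (Spec_solve n a out) := by unfold Spec_solve; infer_instance

-- ===== CLAIM (what is proved, stated in full; the proofs are below) =====
def Claim_equal_solve : Prop := ∀ (n : Int) (a : List Int), Dom_solve n a → Pre_solve n a → Spec_solve n a (solve n a)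

-- ===== LEMMAS AND PROOFS =====

theorem g2_nonneg (x y : Int) : 0 ≤ g2 x y := by
  simp [g2]

theorem g2_right_comm (g x y : Int) : g2 (g2 g x) y = g2 (g2 g y) x := by
  simp only [g2, Int.gcd, Int.natAbs_natCast]
  rw [Nat.gcd_assoc, Nat.gcd_assoc, Nat.gcd_comm x.natAbs]

theorem g2_zero_left (x : Int) (hx : 0 ≤ x) : g2 0 x = x := by
  simp [g2, Int.gcd]; omega

theorem g2_zero_right (g : Int) (hg : 0 ≤ g) : g2 g 0 = g := by
  simp [g2, Int.gcd]; omega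

theorem g2_dvd_left (g x : Int) : g2 g x ∣ g := by
  unfold g2; exact Int.gcd_dvd_left g x

theorem g2_dvd_right (g x : Int) : g2 g x ∣ x := by
  unfold g2; exact Int.gcd_dvd_right g x

theorem g2_add_of_dvd (g u c : Int) (h : g ∣ c) : g2 g (u + c) = g2 g u := by
  obtain ⟨k, rfl⟩ := h
  simp [g2]

theorem g2_eq_zero_iff (g x : Int) (hg : 0 ≤ g) : g2 g x = 0 ↔ g = 0 ∧ x = 0 := by
  simp only [g2]
  constructor
  · intro h
    have : Int.gcd g x = 0 := by exact_mod_cast h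
    have := Int.gcd_eq_zero_iff.mp this
    exact this
  · rintro ⟨rfl, rfl⟩; simp

-- permutation invariance of the gcd fold
theorem foldl_g2_perm (L L' : List Int) (h : L.Perm L') (g : Int) :
    L.foldl g2 g = L'.foldl g2 g := by
  exact @List.Perm.foldl_eq _ _ g2 _ _ ⟨g2_right_comm⟩ h g

-- zeros do not change the gcd fold (with a nonnegative accumulator)
theorem foldl_g2_filter (L : List Int) (g : Int) (hg : 0 ≤ g) :
    (L.filter (fun x => x ≠ 0)).foldl g2 g = L.foldl g2 g := by
  induction L generalizing g with
  | nil => rfl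
  | cons x r ih =>
    by_cases hx : x = 0
    · subst hx
      simpa [g2_zero_right g hg] using ih g hg
    · simpa [hx] using ih (g2 g x) (g2_nonneg g x)

theorem foldl_g2_eq_zero_iff (L : List Int) (g : Int) (hg : 0 ≤ g) :
    L.foldl g2 g = 0 ↔ (g = 0 ∧ ∀ x ∈ L, x = 0) := by
  induction L generalizing g with
  | nil => simp
  | cons x r ih =>
    simp only [List.foldl_cons, ih (g2 g x) (g2_nonneg g x), g2_eq_zero_iff g x hg,
      List.mem_cons]
    constructor
    · rintro ⟨⟨rfl, rfl⟩, h⟩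
      exact ⟨rfl, by rintro y (rfl | hy); rfl; exact h y hy⟩
    · rintro ⟨rfl, h⟩
      exact ⟨⟨rfl, h x (Or.inl rfl)⟩, fun y hy => h y (Or.inr hy)⟩

-- shifting the subtraction base does not change the fold when the accumulator divides the shift
theorem foldl_g2_shift (t : List Int) (h x g : Int) (hd : g ∣ (x - h)) :
    (t.map (fun y => y - h)).foldl g2 g = (t.map (fun y => y - x)).foldl g2 g := by
  induction t generalizing g with
  | nil => rfl
  | cons y r ih =>
    have key : g2 g (y - h) = g2 g (y - x) := by
      have : y - h = (y - x) + (x - h) := by ring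
      rw [this, g2_add_of_dvd g (y - x) (x - h) hd]
    simp only [List.map_cons, List.foldl_cons, key]
    exact ih (g2 g (y - x)) (dvd_trans (g2_dvd_left g (y - x)) hd)

-- the list of consecutive differences, starting from a base
def adjFrom : Int → List Int → List Int
  | _, [] => []
  | h, x :: r => (x - h) :: adjFrom x r

theorem foldl_g2_adjFrom (t : List Int) (h g : Int) :
    (t.map (fun y => y - h)).foldl g2 g = (adjFrom h t).foldl g2 g := by
  induction t generalizing h g with
  | nil => rfl
  | cons x r ih =>
    simp only [List.map_cons, List.foldl_cons, adjFrom]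
    rw [foldl_g2_shift r h x (g2 g (x - h)) (g2_dvd_right g (x - h)), ih x (g2 g (x - h))]

theorem foldl_zip_adjFrom (t : List Int) (h g : Int) :
    (((h :: t).zip t).foldl (fun g p => g2 g (p.2 - p.1)) g) = (adjFrom h t).foldl g2 g := by
  induction t generalizing h g with
  | nil => rfl
  | cons x r ih => simpa [adjFrom] using ih x (g2 g (x - h))

-- ===== VERDICT (by name: the statement is the Claim_ definition above) =====
theorem solve_spec : Claim_equal_solve := by
  intro n a _ ha
  unfold Spec_solve
  unfold Pre_solve at ha
  -- the minimum exists
  obtain ⟨m, hm⟩ : ∃ m, PySem.List.min? a (fun x => x) = some m := by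
    cases hmin : PySem.List.min? a (fun x => x) with
    | none => exact absurd ((PySem.List.min?_eq_none_iff a _).mp hmin) ha
    | some m => exact ⟨m, rfl⟩
  have hmmem : m ∈ a := PySem.List.min?_mem hm
  have hmin : ∀ y ∈ a, m ≤ y := PySem.List.min?_isMin hm
  -- the sorted list is nonempty and its head is m
  set b := PySem.List.sorted a (fun x => x) false with hb
  have hperm : b.Perm a := PySem.List.sorted_perm a _ false
  have hbne : b ≠ [] := by
    rw [hb, Ne, PySem.List.sorted_eq_nil_iff]; exact ha
  obtain ⟨h, t, hbt⟩ := List.exists_cons_of_ne_nil hbne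
  have hhm : h = m := by
    have h1 : ∀ y ∈ a, h ≤ y := PySem.List.key_head_sorted_le a (fun x => x) (hb ▸ hbt)
    have h2 : h ∈ a := hperm.mem_iff.mp (hbt ▸ List.mem_cons_self)
    exact le_antisymm (h1 m hmmem) (hmin h h2)
  have hpermm : (m :: t).Perm a := by rw [← hhm, ← hbt]; exact hperm
  -- B's gcd equals the gcd fold over all differences from m
  set G := (b.zip (PySem.List.slice b (some 1) none)).foldl (fun g p => g2 g (p.2 - p.1)) 0
    with hG
  have hval : (a.map (fun ai => ai - m)).foldl g2 0 = G := by
    rw [hG, PySem.List.slice_from_one, hbt, hhm, List.tail_cons,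
      foldl_zip_adjFrom t m 0, ← foldl_g2_adjFrom t m 0,
      foldl_g2_perm (a.map (fun ai => ai - m)) ((m :: t).map (fun ai => ai - m))
        (List.Perm.map _ hpermm).symm 0]
    simp [g2_zero_right 0 le_rfl]
  have hBval : solve_alt n a = if G ≠ 0 then G else -1 := rfl
  have hAval : solve n a = (match (a.map (fun ai => ai - m)).filter (fun di => di ≠ 0) with
      | [] => (-1 : Int) | g0 :: rest => rest.foldl g2 g0) := by
    unfold solve; rw [hm]
  have hfull : ((a.map (fun ai => ai - m)).filter (fun di => di ≠ 0)).foldl g2 0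
      = (a.map (fun ai => ai - m)).foldl g2 0 :=
    foldl_g2_filter _ 0 le_rfl
  have hnnd : ∀ x ∈ a.map (fun ai => ai - m), 0 ≤ x := by
    intro x hx
    obtain ⟨y, hy, rfl⟩ := List.mem_map.mp hx
    exact sub_nonneg.mpr (hmin y hy)
  rw [hAval, hBval]
  cases hc : (a.map (fun ai => ai - m)).filter (fun di => di ≠ 0) with
  | nil =>
    -- all differences are zero, so B's gcd is 0 and B returns -1 too
    have hallz : ∀ x ∈ a.map (fun ai => ai - m), x = 0 := by
      intro x hx
      by_contra hne
      have : x ∈ (a.map (fun ai => ai - m)).filter (fun di => di ≠ 0) :=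
        List.mem_filter.mpr ⟨hx, by simpa using hne⟩
      rw [hc] at this
      simp at this
    have hG0 : G = 0 := by
      rw [← hval]
      exact (foldl_g2_eq_zero_iff _ 0 le_rfl).mpr ⟨rfl, hallz⟩
    simp [hG0]
  | cons g0 rest =>
    have hg0 : g0 ∈ (a.map (fun ai => ai - m)).filter (fun di => di ≠ 0) :=
      hc ▸ List.mem_cons_self
    have hg0d : g0 ∈ a.map (fun ai => ai - m) := (List.mem_filter.mp hg0).1
    have hA : rest.foldl g2 g0 = G := by
      have : ((g0 :: rest).foldl g2 0) = G := by rw [← hc, hfull, hval]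
      rw [← this]
      simp [g2_zero_left g0 (hnnd g0 hg0d)]
    have hGne : G ≠ 0 := by
      rw [← hval]
      intro h0
      have := ((foldl_g2_eq_zero_iff _ 0 le_rfl).mp h0).2 g0 hg0d
      have hg0ne : g0 ≠ 0 := by simpa using (List.mem_filter.mp hg0).2
      exact hg0ne this
    simp [hGne, hA]
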